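-- pv_equiv track=rewrite | github.com/McElyea/Orket | scripts/governance/check_long_session_soak_tests.py | _is_expected_turn_order
-- ===== SOURCE A (Python) =====
-- def _is_expected_turn_order(events: list[str]) -> bool:
--     required_prefix = ["selected", "loading", "ready"]
--     if len(events) < 5:
--         return False
--     if events[:3] != required_prefix:
--         return False
--     if events[-1] != "stopped":
--         return False
--     delta_events = [row for row in events[3:-1] if row == "token_delta"]
--     return len(delta_events) >= 1 and all(row == "token_delta" for row in events[3:-1])
-- ===== SOURCE B (Python) =====
-- def _is_expected_turn_order(events: list[str]) -> bool:
--     if len(events) < 5: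
--         return False
--     expected = ["selected", "loading", "ready"] + ["token_delta"] * (len(events) - 4) + ["stopped"]
--     return events == expected
-- ===== Notes on version B (the rewrite author's own statement) =====
-- stated objective: simpler
-- what changed: Replaces the prefix-slice check, last-element check and middle filter/all scan with constructing the single canonical expected sequence and one list equality comparison.
import Mathlib
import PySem

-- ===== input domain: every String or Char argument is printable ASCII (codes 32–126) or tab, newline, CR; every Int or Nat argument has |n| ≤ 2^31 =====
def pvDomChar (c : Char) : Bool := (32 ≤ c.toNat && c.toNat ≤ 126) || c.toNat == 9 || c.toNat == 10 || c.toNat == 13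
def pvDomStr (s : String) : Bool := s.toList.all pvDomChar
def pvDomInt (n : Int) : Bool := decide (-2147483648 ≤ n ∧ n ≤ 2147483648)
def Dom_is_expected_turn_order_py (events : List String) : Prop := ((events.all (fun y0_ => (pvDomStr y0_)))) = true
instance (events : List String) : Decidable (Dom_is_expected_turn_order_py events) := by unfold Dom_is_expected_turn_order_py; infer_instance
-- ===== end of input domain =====

-- B replaces A's slice/last/filter checks by building the one canonical expected sequence and comparing for equality (simpler decomposition, same cost).


-- ===== PORT A =====
def is_expected_turn_order_py (events : List String) : Bool :=
  let required_prefix : List String := ["selected", "loading", "ready"]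
  if events.length < 5 then false
  else if PySem.List.slice events none (some 3) ≠ required_prefix then false
  else if PySem.List.pyGet? events (-1) ≠ some "stopped" then false
  else
    let mid := PySem.List.slice events (some 3) (some (-1))
    let delta_events := mid.filter (fun row => row == "token_delta")
    decide (1 ≤ delta_events.length) && mid.all (fun row => row == "token_delta")

-- ===== PORT B =====
def is_expected_turn_order_py_alt (events : List String) : Bool :=
  if events.length < 5 then false
  else
    let expected : List String := ["selected", "loading", "ready"]
      ++ List.replicate (events.length - 4) "token_delta" ++ ["stopped"]
    events == expected

-- ===== PRECONDITION & SPEC =====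
def Spec_is_expected_turn_order_py (events : List String) (out : Bool) : Prop := out = is_expected_turn_order_py_alt events
instance (events : List String) (out : Bool) : Decidable (Spec_is_expected_turn_order_py events out) := by unfold Spec_is_expected_turn_order_py; infer_instance

-- ===== CLAIM (what is proved, stated in full; the proofs are below) =====
def Claim_equal_is_expected_turn_order_py : Prop := ∀ (events : List String), Dom_is_expected_turn_order_py events → Spec_is_expected_turn_order_py events (is_expected_turn_order_py events)

-- ===== LEMMAS AND PROOFS =====

theorem slice_three_neg_one (xs : List String) (h : 3 ≤ xs.length) :
    PySem.List.slice xs (some 3) (some (-1)) = (xs.drop 3).dropLast := by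
  simp [PySem.List.slice, List.dropLast_eq_take]
  have h3 : min 3 xs.length = 3 := by omega
  have h4 : xs.length - 1 - 3 = xs.length - 3 - 1 := by omega
  rw [h3, h4]

theorem tail_lemma : ∀ (rest : List String) (x y : String),
    ((decide (1 ≤ (((x :: y :: rest).dropLast).filter (fun row => row == "token_delta")).length)
      && ((x :: y :: rest).dropLast).all (fun row => row == "token_delta"))
      && ((x :: y :: rest).getLast? == some "stopped"))
    = ((x :: y :: rest) == List.replicate ((x :: y :: rest).length - 1) "token_delta" ++ ["stopped"]) := by
  intro rest
  induction rest with
  | nil =>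
    intro x y
    by_cases hx : x = "token_delta" <;> by_cases hy : y = "stopped" <;> simp [hx, hy, List.filter]
  | cons z zs ih =>
    intro x y
    have h := ih y z
    by_cases hx : x = "token_delta"
    · subst hx
      simp only [List.dropLast_cons₂, List.getLast?_cons_cons, List.length_cons,
        Nat.add_sub_cancel, List.replicate_succ, List.cons_append, List.cons_beq_cons,
        List.filter_cons, List.all_cons, beq_self_eq_true, if_true, Bool.true_and] at *
      rw [← h]
      by_cases hy : y = "token_delta"
      · simp [hy]
      · have hy' : (y == "token_delta") = false := by simp [hy]
        simp [hy']
    · have hx' : (x == "token_delta") = false := by simp [hx]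
      simp only [List.replicate_succ, List.length_cons, Nat.add_sub_cancel, List.cons_append,
        List.cons_beq_cons, hx', List.dropLast_cons₂, List.all_cons, Bool.false_and,
        Bool.and_false, Bool.false_and]

theorem prefix_beq (d e : String) (rest tl : List String) :
    (("selected" :: "loading" :: "ready" :: d :: e :: rest : List String)
      == ("selected" :: "loading" :: "ready" :: tl : List String))
    = ((d :: e :: rest : List String) == tl) := by
  simp [List.cons_beq_cons]

theorem main_eq (events : List String) :
    is_expected_turn_order_py events = is_expected_turn_order_py_alt events := by
  unfold is_expected_turn_order_py is_expected_turn_order_py_alt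
  match events with
  | [] => rfl
  | [a] => rfl
  | [a, b] => rfl
  | [a, b, c] => rfl
  | [a, b, c, d] => rfl
  | a :: b :: c :: d :: e :: rest =>
    have hlen : ¬ ((a :: b :: c :: d :: e :: rest).length < 5) := by simp
    rw [if_neg hlen, if_neg hlen]
    rw [PySem.List.slice_to _ (by norm_num)]
    rw [PySem.List.pyGet?_neg_one]
    simp only [List.getLast?_cons_cons]
    rw [slice_three_neg_one _ (by simp)]
    simp only [List.drop_succ_cons, List.drop_zero]
    have htake : List.take (Int.toNat 3) (a :: b :: c :: d :: e :: rest) = [a, b, c] := rfl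
    rw [htake]
    by_cases ha : a = "selected" <;> by_cases hb : b = "loading" <;> by_cases hc : c = "ready"
    · subst ha; subst hb; subst hc
      rw [if_neg (by simp)]
      have hk : ("selected" :: "loading" :: "ready" :: d :: e :: rest).length - 4
          = rest.length + 1 + 1 - 1 := by simp
      by_cases hl : (e :: rest).getLast? = some "stopped"
      · rw [if_neg (by simp [hl])]
        have h := tail_lemma rest d e
        simp only [List.getLast?_cons_cons] at h
        rw [hl] at h
        simp only [beq_self_eq_true, Bool.and_true, List.length_cons] at h
        rw [hk]
        simp only [List.cons_append, List.nil_append]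
        rw [prefix_beq]
        exact h
      · rw [if_pos hl]
        have h := tail_lemma rest d e
        simp only [List.getLast?_cons_cons] at h
        have hl' : ((e :: rest).getLast? == some "stopped") = false := by simpa using hl
        rw [hl', Bool.and_false] at h
        simp only [List.length_cons] at h
        rw [hk]
        simp only [List.cons_append, List.nil_append]
        rw [prefix_beq]
        exact h
    all_goals
      rw [if_pos (by simp [ha, hb, hc])]; simp [ha, hb, hc, List.cons_beq_cons]

-- ===== VERDICT (by name: the statement is the Claim_ definition above) =====
theorem is_expected_turn_order_py_spec : Claim_equal_is_expected_turn_order_py := by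
  intro events _
  unfold Spec_is_expected_turn_order_py
  exact main_eq events
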